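-- pv_equiv track=rewrite | github.com/HyewonKkang/algorithm | Programmers/level2/defenseGame.py | solution
-- ===== SOURCE A (Python) =====
-- import heapq
--
-- def solution(n, k, enemy):
--     answer = 0
--     heap = []
--
--     if k >= len(enemy):
--         return len(enemy)
--
--     for i, e in enumerate(enemy):
--         heapq.heappush(heap, -e)
--         n -= e
--         if n < 0:
--             if k <= 0: break
--             else:
--                 n -= heapq.heappop(heap)
--                 k -= 1
--         answer += 1
--
--     return answer
-- ===== SOURCE B (Python) =====
-- def solution(n, k, enemy):
--     K = max(min(k, len(enemy)), 0)
--     # cur[c] = best possible remaining health after the rounds processed so far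
--     #          using exactly c ability charges, or None if that is impossible
--     cur = [n] + [None] * K
--     best = 0
--     for e in enemy:
--         nxt = []
--         prev = None
--         for v in cur:
--             w = v - e if (v is not None and v - e >= 0) else None
--             if prev is not None and (w is None or prev > w):
--                 w = prev
--             nxt.append(w)
--             prev = v
--         if all(w is None for w in nxt):
--             break
--         cur = nxt
--         best += 1
--     return best
-- ===== Notes on version B (the rewrite author's own statement) =====
-- stated objective: alternative
-- what changed: Replaces the online pop-largest heap greedy with a round-by-round dynamic program over ability-use schedules (cur[c] = best remaining health using exactly c charges, capped at min(k, len(enemy)) charges), surviving a round iff some cell stays alive.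
import Mathlib
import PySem

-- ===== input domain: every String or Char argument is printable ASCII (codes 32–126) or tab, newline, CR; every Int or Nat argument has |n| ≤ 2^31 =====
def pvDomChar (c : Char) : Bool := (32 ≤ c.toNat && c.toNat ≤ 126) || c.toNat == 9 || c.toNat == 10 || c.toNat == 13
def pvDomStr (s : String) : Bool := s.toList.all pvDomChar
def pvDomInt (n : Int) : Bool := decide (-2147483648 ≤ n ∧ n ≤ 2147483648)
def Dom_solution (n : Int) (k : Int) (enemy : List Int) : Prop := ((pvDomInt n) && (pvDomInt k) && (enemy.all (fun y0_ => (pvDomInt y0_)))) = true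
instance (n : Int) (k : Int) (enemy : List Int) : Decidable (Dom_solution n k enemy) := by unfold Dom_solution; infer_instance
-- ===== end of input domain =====

-- B replaces A's online pop-largest heap greedy by a round-by-round dynamic program over
-- ability-use schedules (cell c = best remaining health using exactly c charges); proved equal
-- to A on every input (alternative decomposition, not faster).


-- ===== PORT A =====
-- heapq on Int payloads is observationally a multiset with push = insert, pop = remove-min;
-- we keep it as an ascending sorted list (exact: heapq.heappop returns the minimum, and for
-- Int elements equal values are indistinguishable, so the list model is exact).
def heapPush (h : List Int) (x : Int) : List Int :=
  match h with
  | [] => [x]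
  | y :: t => if x ≤ y then x :: y :: t else y :: heapPush t x

-- the 'for i, e in enumerate(enemy)' loop of A (i is unused by A); state (n, k, heap, answer)
def loopA : List Int → Int → Int → List Int → Int → Int
  | [], _, _, _, answer => answer
  | e :: rest, n, k, heap, answer =>
    let heap' := heapPush heap (-e)
    let n' := n - e
    if n' < 0 then
      if k ≤ 0 then answer
      else
        match heap' with
        | [] => answer          -- unreachable: heap' just received -e
        | m :: hrest => loopA rest (n' - m) (k - 1) hrest (answer + 1)
    else loopA rest n' k heap' (answer + 1)

def solution (n : Int) (k : Int) (enemy : List Int) : Int :=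
  if (enemy.length : Int) ≤ k then (enemy.length : Int)
  else loopA enemy n k [] 0

-- ===== PORT B =====
-- one DP cell update: w = v - e if that stays ≥ 0, else None; then the refund branch prev
def dpCell (e : Int) (v prev : Option Int) : Option Int :=
  let w : Option Int :=
    match v with
    | some x => if 0 ≤ x - e then some (x - e) else none
    | none => none
  match prev with
  | some p =>
    match w with
    | none => some p
    | some x => if p > x then some p else some x
  | none => w

-- the 'for v in cur' inner loop, carrying prev
def dpRowStep (e : Int) : List (Option Int) → Option Int → List (Option Int)
  | [], _ => []
  | v :: rest, prev => dpCell e v prev :: dpRowStep e rest v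

-- the 'for e in enemy' outer loop with the all-None break
def loopB : List Int → List (Option Int) → Int → Int
  | [], _, best => best
  | e :: rest, cur, best =>
    let nxt := dpRowStep e cur none
    if nxt.all (fun w => w.isNone) then best
    else loopB rest nxt (best + 1)

def solution_alt (n : Int) (k : Int) (enemy : List Int) : Int :=
  loopB enemy (some n :: List.replicate (max (min k (enemy.length : Int)) 0).toNat none) 0

-- ===== PRECONDITION & SPEC =====

def Spec_solution (n : Int) (k : Int) (enemy : List Int) (out : Int) : Prop := out = solution_alt n k enemy
instance (n : Int) (k : Int) (enemy : List Int) (out : Int) : Decidable (Spec_solution n k enemy out) := by unfold Spec_solution; infer_instance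

-- ===== CLAIM (what is proved, stated in full; the proofs are below) =====
def Claim_equal_solution : Prop := ∀ (n : Int) (k : Int) (enemy : List Int), Dom_solution n k enemy → Spec_solution n k enemy (solution n k enemy)

-- ===== LEMMAS AND PROOFS =====

-- canonical descending insertion (value-level model of the max side of A's heap)
def insD (e : Int) : List Int → List Int
  | [] => [e]
  | a :: t => if a ≤ e then e :: a :: t else a :: insD e t

def PWd (l : List Int) : Prop := l.Pairwise (fun a b => b ≤ a)

lemma insD_ne_nil (e : Int) (l : List Int) : insD e l ≠ [] := by
  cases l with
  | nil => simp [insD]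
  | cons a t => by_cases h : a ≤ e <;> simp [insD, h]

lemma insD_perm (e : Int) (l : List Int) : (insD e l).Perm (e :: l) := by
  induction l with
  | nil => simp [insD]
  | cons a t ih =>
    by_cases h : a ≤ e
    · simp [insD, h]
    · simpa [insD, h] using ((ih.cons a).trans (List.Perm.swap e a t))

lemma length_insD (e : Int) (l : List Int) : (insD e l).length = l.length + 1 := by
  simpa using (insD_perm e l).length_eq

lemma sum_insD (e : Int) (l : List Int) : (insD e l).sum = e + l.sum := by
  simpa using (insD_perm e l).sum_eq

lemma insD_pairwise {e : Int} {l : List Int} (h : PWd l) : PWd (insD e l) := by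
  unfold PWd at *
  induction l with
  | nil => simp [insD]
  | cons a t ih =>
    rcases (List.pairwise_cons.mp h) with ⟨ha, ht⟩
    by_cases hc : a ≤ e
    · simp only [insD, hc, if_true]
      refine List.pairwise_cons.mpr ⟨?_, h⟩
      intro b hb
      rcases List.mem_cons.mp hb with rfl | hb
      · exact hc
      · exact le_trans (ha b hb) hc
    · simp only [insD, hc, if_false]
      refine List.pairwise_cons.mpr ⟨?_, ih ht⟩
      intro b hb
      rcases List.mem_cons.mp ((insD_perm e t).mem_iff.mp hb) with rfl | hb'
      · exact le_of_lt (lt_of_not_ge hc)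
      · exact ha b hb'

lemma headD_insD_ge (e : Int) (l : List Int) : e ≤ (insD e l).headD 0 := by
  cases l with
  | nil => simp [insD]
  | cons a t =>
    by_cases h : a ≤ e
    · simp [insD, h]
    · simp [insD, h]; omega

lemma heapPush_map_neg (l : List Int) (e : Int) :
    heapPush (l.map (fun x => -x)) (-e) = (insD e l).map (fun x => -x) := by
  induction l with
  | nil => simp [heapPush, insD]
  | cons a t ih =>
    by_cases h : a ≤ e
    · simp [heapPush, insD, h, neg_le_neg_iff]
    · have : ¬ (-e ≤ -a) := by omega
      simp [heapPush, insD, h, this, ih]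

lemma sum_take_insD (e : Int) : ∀ (u : Nat) (l : List Int), PWd l → u ≤ l.length →
    ((insD e l).take (u+1)).sum = (l.take u).sum + (insD e (l.drop u)).headD 0 := by
  intro u
  induction u with
  | zero =>
    intro l _ _
    cases l with
    | nil => simp [insD]
    | cons a t => by_cases h : a ≤ e <;> simp [insD, h]
  | succ v ih =>
    intro l hl hu
    cases l with
    | nil => simp at hu
    | cons a t =>
      rcases List.pairwise_cons.mp hl with ⟨ha, ht⟩
      by_cases h : a ≤ e
      · have hdrop : (insD e (t.drop v)).headD 0 = e := by
          cases hdt : t.drop v with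
          | nil => simp [insD]
          | cons x r =>
            have hx' : x ∈ t.drop v := by rw [hdt]; simp
            have hx : x ∈ t := List.mem_of_mem_drop hx'
            have : x ≤ e := le_trans (ha x hx) h
            simp [insD, this]
        simp only [insD, h, if_true, List.take_succ_cons, List.sum_cons,
          List.drop_succ_cons, hdrop]
        ring
      · simp only [insD, h, if_false, List.take_succ_cons, List.sum_cons,
          List.drop_succ_cons]
        rw [ih t ht (by simpa using hu)]
        ring

lemma sum_take_succ_getD (l : List Int) (u : Nat) (hu : u < l.length) :
    (l.take (u+1)).sum = (l.take u).sum + l.getD u 0 := by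
  rw [List.take_succ]
  have : l[u]? = some l[u] := List.getElem?_eq_getElem hu
  simp [this, List.getD_eq_getElem, hu]

-- the j largest of the heap after a push, in terms of the heap before
lemma sum_take_insD_max (e : Int) {HD : List Int} (hPW : PWd HD) {j : Nat}
    (h1 : 1 ≤ j) (h2 : j ≤ HD.length) :
    ((insD e HD).take j).sum = (HD.take (j-1)).sum + max e (HD.getD (j-1) 0) := by
  have hj : j - 1 + 1 = j := by omega
  have h := sum_take_insD e (j-1) HD hPW (by omega)
  rw [hj] at h
  rw [h]
  congr 1
  have hlt : j - 1 < HD.length := by omega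
  rw [List.drop_eq_getElem_cons hlt]
  by_cases hc : HD[j-1] ≤ e
  · rw [List.getD_eq_getElem _ _ hlt]
    simp only [insD, hc, if_true, List.headD_cons]
    omega
  · rw [List.getD_eq_getElem _ _ hlt]
    simp only [insD, hc, if_false, List.headD_cons]
    omega

lemma sum_take_insD_full (e : Int) (HD : List Int) :
    ((insD e HD).take (HD.length + 1)).sum = e + HD.sum := by
  rw [List.take_of_length_le (by rw [length_insD]), sum_insD]

-- the closed-form DP row: cell c = best health using exactly c charges
def mkRow (nA : Int) (u : Nat) (HD : List Int) (K : Nat) : List (Option Int) :=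
  (List.range (K+1)).map
    (fun c => if c < u ∨ u + HD.length < c then none
              else some (nA + (HD.take (c-u)).sum))

lemma mkRow_get? (nA : Int) (u : Nat) (HD : List Int) (K c : Nat) :
    (mkRow nA u HD K)[c]? =
      if c < K + 1 then
        some (if c < u ∨ u + HD.length < c then none
              else some (nA + (HD.take (c-u)).sum))
      else none := by
  simp only [mkRow, List.getElem?_map, List.getElem?_range]
  split <;> simp_all

lemma dpRowStep_get? (e : Int) : ∀ (row : List (Option Int)) (prev : Option Int) (c : Nat),
    (dpRowStep e row prev)[c]? =
      (row[c]?).map (fun v =>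
        dpCell e v (if c = 0 then prev else (row[c-1]?).getD none)) := by
  intro row
  induction row with
  | nil => intro prev c; simp [dpRowStep]
  | cons v rest ih =>
    intro prev c
    cases c with
    | zero => simp [dpRowStep]
    | succ c =>
      simp only [dpRowStep, List.getElem?_cons_succ]
      rw [ih v c]
      cases c with
      | zero => simp
      | succ d => simp

lemma mkRow_all_none {nA : Int} {u : Nat} {HD : List Int} {K : Nat} (h : K < u) :
    (mkRow nA u HD K).all (fun w => w.isNone) = true := by
  simp only [mkRow, List.all_map, List.all_eq_true]
  intro c hc
  have : c < K + 1 := List.mem_range.mp hc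
  simp only [Function.comp]
  rw [if_pos (Or.inl (by omega))]
  rfl

lemma mkRow_not_all_none {nA : Int} {u : Nat} {HD : List Int} {K : Nat} (h : u ≤ K) :
    (mkRow nA u HD K).all (fun w => w.isNone) = false := by
  have hg : (mkRow nA u HD K)[u]? = some (some (nA + (HD.take (u-u)).sum)) := by
    rw [mkRow_get?, if_pos (by omega), if_neg (by omega)]
  have hmem : (some (nA + (HD.take (u-u)).sum) : Option Int) ∈ mkRow nA u HD K :=
    List.mem_of_getElem? hg
  rw [List.all_eq_false]
  exact ⟨_, hmem, by simp⟩

lemma dpCell_none (e : Int) (prev : Option Int) : dpCell e none prev = prev := by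
  cases prev <;> rfl

lemma dpCell_some_none (e x : Int) :
    dpCell e (some x) none = if 0 ≤ x - e then some (x - e) else none := rfl

lemma dpCell_some_some (e x p : Int) :
    dpCell e (some x) (some p) =
      if 0 ≤ x - e then (if p > x - e then some p else some (x - e)) else some p := by
  by_cases h : 0 ≤ x - e
  · simp only [dpCell]
    rw [if_pos h, if_pos h]
  · simp only [dpCell]
    rw [if_neg h, if_neg h]

-- the inner cells u < c ≤ u + |HD|: the guarded max realises the push
lemma dpCell_mid (e nA : Int) {HD : List Int} (hPW : PWd HD) {j : Nat}
    (h1 : 1 ≤ j) (h2 : j ≤ HD.length)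
    (hpos : 0 ≤ nA + (HD.take (j-1)).sum) :
    dpCell e (some (nA + (HD.take j).sum)) (some (nA + (HD.take (j-1)).sum))
      = some (nA - e + ((insD e HD).take j).sum) := by
  have hM := sum_take_insD_max e hPW h1 h2
  have hT : (HD.take j).sum = (HD.take (j-1)).sum + HD.getD (j-1) 0 := by
    have := sum_take_succ_getD HD (j-1) (by omega)
    rwa [show j - 1 + 1 = j by omega] at this
  rw [dpCell_some_some]
  split_ifs <;> simp only [Option.some.injEq] <;> omega

-- ONE DP step on the closed-form row follows A's three transition cases
lemma step_mkRow (e nA : Int) (u K : Nat) (HD : List Int) (hPW : PWd HD) (hu : u ≤ K)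
    (hpos : ∀ i < HD.length, 0 ≤ nA + (HD.take i).sum) :
    dpRowStep e (mkRow nA u HD K) none =
      if 0 ≤ nA - e then mkRow (nA - e) u (insD e HD) K
      else if u < K then
        mkRow (nA - e + (insD e HD).headD 0) (u + 1) (insD e HD).tail K
      else mkRow 0 (K + 1) [] K := by
  have hlen : (insD e HD).length = HD.length + 1 := length_insD e HD
  apply List.ext_getElem?
  intro c
  by_cases hcK : c < K + 1
  · rw [dpRowStep_get?, mkRow_get? nA u HD K c, if_pos hcK]
    have hprev : (if c = 0 then (none : Option Int)
        else ((mkRow nA u HD K)[c-1]?).getD none)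
        = if c = 0 ∨ c - 1 < u ∨ u + HD.length < c - 1 then none
          else some (nA + (HD.take (c-1-u)).sum) := by
      by_cases hc0 : c = 0
      · rw [if_pos hc0, if_pos (Or.inl hc0)]
      · rw [if_neg hc0, mkRow_get?, if_pos (by omega)]
        simp only [Option.getD_some]
        by_cases h : c - 1 < u ∨ u + HD.length < c - 1
        · rw [if_pos h, if_pos (Or.inr h)]
        · rw [if_neg h, if_neg (by tauto)]
    simp only [Option.map_some]
    rw [hprev]
    by_cases hO1 : 0 ≤ nA - e
    · rw [if_pos hO1, mkRow_get? (nA - e) u (insD e HD) K c, if_pos hcK, hlen]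
      by_cases hR1 : c < u
      · rw [if_pos (Or.inl hR1), if_pos (by omega), if_pos (Or.inl hR1)]
        simp [dpCell_none]
      · by_cases hR2 : c = u
        · rw [if_neg (by omega), if_pos (by omega), if_neg (by omega)]
          simp only [show c - u = 0 by omega, List.take_zero, List.sum_nil, add_zero]
          rw [dpCell_some_none, if_pos hO1]
        · by_cases hR3 : c ≤ u + HD.length
          · rw [if_neg (by omega), if_neg (by omega), if_neg (by omega)]
            have := dpCell_mid e nA hPW (j := c - u) (by omega) (by omega)
              (hpos (c - u - 1) (by omega))
            rw [show c - 1 - u = c - u - 1 by omega]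
            rw [this]
          · by_cases hR4 : c = u + HD.length + 1
            · rw [if_pos (by omega), if_neg (by omega), if_neg (by omega)]
              rw [dpCell_none]
              rw [show c - 1 - u = HD.length by omega, List.take_length,
                show c - u = HD.length + 1 by omega, sum_take_insD_full]
              simp only [Option.some.injEq]
              omega
            · rw [if_pos (by omega), if_pos (by omega), if_pos (by omega)]
              simp [dpCell_none]
    · rw [if_neg hO1]
      by_cases hO2 : u < K
      · rw [if_pos hO2,
          mkRow_get? (nA - e + (insD e HD).headD 0) (u+1) (insD e HD).tail K c,
          if_pos hcK]
        cases hcons : insD e HD with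
        | nil => exact absurd hcons (insD_ne_nil _ _)
        | cons q t =>
          have htl : t.length = HD.length := by
            rw [hcons] at hlen; simpa using hlen
          simp only [List.headD_cons, List.tail_cons, htl]
          by_cases hR1 : c < u
          · rw [if_pos (Or.inl hR1), if_pos (by omega), if_pos (Or.inl (by omega))]
            simp [dpCell_none]
          · by_cases hR2 : c = u
            · rw [if_neg (by omega), if_pos (by omega), if_pos (Or.inl (by omega))]
              simp only [show c - u = 0 by omega, List.take_zero, List.sum_nil, add_zero]
              rw [dpCell_some_none, if_neg hO1]
            · by_cases hR3 : c ≤ u + HD.length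
              · rw [if_neg (by omega), if_neg (by omega), if_neg (by omega)]
                have hmid := dpCell_mid e nA hPW (j := c - u) (by omega) (by omega)
                  (hpos (c - u - 1) (by omega))
                rw [show c - 1 - u = c - u - 1 by omega, hmid, hcons]
                rw [show c - u = (c - (u+1)) + 1 by omega]
                simp only [List.take_succ_cons, List.sum_cons, Option.some.injEq]
                ring
              · by_cases hR4 : c = u + HD.length + 1
                · rw [if_pos (by omega), if_neg (by omega), if_neg (by omega)]
                  rw [dpCell_none]
                  have hfull := sum_take_insD_full e HD
                  rw [hcons] at hfull
                  have htk : (q :: t).take (HD.length + 1) = q :: t := by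
                    apply List.take_of_length_le
                    simp [htl]
                  rw [htk, List.sum_cons] at hfull
                  rw [show c - 1 - u = HD.length by omega, List.take_length,
                    show c - (u+1) = HD.length by omega, ← htl, List.take_length]
                  simp only [Option.some.injEq]
                  omega
                · rw [if_pos (by omega), if_pos (by omega), if_pos (Or.inr (by omega))]
                  simp [dpCell_none]
      · rw [if_neg hO2, mkRow_get? 0 (K+1) ([] : List Int) K c, if_pos hcK]
        have huK : u = K := by omega
        rw [if_pos (show c < K + 1 ∨ K + 1 + ([] : List Int).length < c from Or.inl hcK)]
        by_cases hR1 : c < u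
        · rw [if_pos (show c < u ∨ u + HD.length < c from Or.inl hR1),
            if_pos (show c = 0 ∨ c - 1 < u ∨ u + HD.length < c - 1 by omega),
            dpCell_none]
        · rw [if_neg (show ¬ (c < u ∨ u + HD.length < c) by omega),
            if_pos (show c = 0 ∨ c - 1 < u ∨ u + HD.length < c - 1 by omega)]
          simp only [show c - u = 0 by omega, List.take_zero, List.sum_nil, add_zero]
          rw [dpCell_some_none, if_neg hO1]
  · rw [dpRowStep_get?, mkRow_get? nA u HD K c, if_neg hcK]
    simp only [Option.map_none]
    split_ifs <;> rw [mkRow_get?, if_neg hcK]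
lemma heapPush_ne_nil (h : List Int) (x : Int) : heapPush h x ≠ [] := by
  cases h with
  | nil => simp [heapPush]
  | cons y t => by_cases hc : x ≤ y <;> simp [heapPush, hc]

-- A never breaks while abilities outnumber the remaining waves
lemma loopA_total : ∀ (rest : List Int) (nA kleft : Int) (heap : List Int) (ans : Int),
    (rest.length : Int) ≤ kleft → loopA rest nA kleft heap ans = ans + rest.length := by
  intro rest
  induction rest with
  | nil => intro nA kleft heap ans _; simp [loopA]
  | cons e rest ih =>
    intro nA kleft heap ans h
    simp only [List.length_cons] at h
    push_cast at h
    simp only [loopA]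
    by_cases hdef : nA - e < 0
    · rw [if_pos hdef, if_neg (by omega)]
      cases hp : heapPush heap (-e) with
      | nil => exact absurd hp (heapPush_ne_nil _ _)
      | cons m hr =>
        have hred : (match m :: hr with
            | [] => ans
            | m' :: h' => loopA rest (nA - e - m') (kleft - 1) h' (ans + 1))
            = loopA rest (nA - e - m) (kleft - 1) hr (ans + 1) := rfl
        rw [hred, ih _ _ _ _ (by omega)]
        simp only [List.length_cons]; push_cast; ring
    · rw [if_neg hdef, ih _ _ _ _ (by omega)]
      simp only [List.length_cons]; push_cast; ring

-- the simulation invariant: A's loop state corresponds to the closed-form DP row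
lemma dp_main (k : Int) (K : Nat) : ∀ (rest HD : List Int) (u : Nat) (nA ans : Int),
    PWd HD → ((u : Int) ≤ max k 0) → u ≤ K → ((K : Int) ≤ max k 0) →
    (u + rest.length ≤ K ∨ (K : Int) = max k 0) →
    (nA < 0 → HD = []) → (∀ i < HD.length, 0 ≤ nA + (HD.take i).sum) →
    loopA rest nA (k - u) (HD.map (fun x => -x)) ans
      = loopB rest (mkRow nA u HD K) ans := by
  intro rest
  induction rest with
  | nil => intro HD u nA ans _ _ _ _ _ _ _; simp [loopA, loopB]
  | cons e rest ih =>
    intro HD u nA ans hPW hu huK hKk hHP hneg hpos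
    simp only [List.length_cons] at hHP
    simp only [loopA, loopB, heapPush_map_neg]
    rw [step_mkRow e nA u K HD hPW huK hpos]
    by_cases hdef : nA - e < 0
    · rw [if_pos hdef, if_neg (by omega : ¬ (0 ≤ nA - e))]
      by_cases hk2 : k - (u:Int) ≤ 0
      · -- A breaks; the DP row dies in the same round
        rw [if_pos hk2, if_neg (by omega : ¬ u < K),
          mkRow_all_none (Nat.lt_succ_self _)]
        simp
      · -- A pops the largest; the row shifts to u+1 charges
        have huK1 : u + 1 ≤ K := by
          rcases hHP with h | h
          · omega
          · omega
        rw [if_neg hk2, if_pos (by omega : u < K)]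
        cases hcons : insD e HD with
        | nil => exact absurd hcons (insD_ne_nil _ _)
        | cons q t =>
          have hLt : t.length = HD.length := by
            have := length_insD e HD
            rw [hcons] at this
            simpa using this
          have hred : (match List.map (fun x => -x) (q :: t) with
              | [] => ans
              | m :: hrest => loopA rest (nA - e - m) (k - ↑u - 1) hrest (ans + 1))
              = loopA rest (nA - e - (-q)) (k - ↑u - 1) (t.map (fun x => -x)) (ans + 1) := rfl
          rw [hred, mkRow_not_all_none huK1]
          simp only [Bool.false_eq_true, if_false, List.headD_cons, List.tail_cons]
          have hPWt : PWd t := by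
            have := insD_pairwise (e := e) hPW
            rw [hcons] at this
            exact (List.pairwise_cons.mp this).2
          have hqe : e ≤ q := by
            have := headD_insD_ge e HD
            rw [hcons] at this
            simpa using this
          have hstep := ih t (u+1) (nA - e + q) (ans + 1) hPWt (by push_cast; omega)
            huK1 hKk (by omega)
            (by intro hlt
                cases hHD : HD with
                | nil =>
                  rw [hHD] at hcons
                  simp only [insD] at hcons
                  exact ((List.cons.injEq _ _ _ _).mp hcons).2.symm
                | cons a s =>
                  have hnn : 0 ≤ nA := by
                    by_contra hcon
                    have h0 := hneg (by omega)
                    rw [hHD] at h0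
                    simp at h0
                  omega)
            (by intro i hi
                rw [hLt] at hi
                have hq : q + (t.take i).sum = ((insD e HD).take (i+1)).sum := by
                  rw [hcons]; simp
                have hM := sum_take_insD_max e hPW (j := i+1) (by omega) (by omega)
                simp only [Nat.add_sub_cancel] at hM
                have h0 := hpos i hi
                omega)
          rw [show nA - e - (-q) = nA - e + q by ring,
            show k - ↑u - 1 = k - ↑(u+1) by push_cast; ring]
          exact hstep
    · rw [if_neg hdef, if_pos (by omega : (0:Int) ≤ nA - e),
        mkRow_not_all_none huK]
      simp only [Bool.false_eq_true, if_false]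
      exact ih (insD e HD) u (nA - e) (ans + 1) (insD_pairwise hPW) hu
        huK hKk (by omega)
        (by intro h; omega)
        (by intro i hi
            rw [length_insD] at hi
            rcases Nat.eq_zero_or_pos i with h0 | h1
            · subst h0; simpa using (by omega : (0:Int) ≤ nA - e)
            · have hM := sum_take_insD_max e hPW (j := i) (by omega) (by omega)
              have h0 := hpos (i-1) (by omega)
              omega)

lemma mkRow_init (nA : Int) (K : Nat) :
    mkRow nA 0 [] K = some nA :: List.replicate K none := by
  apply List.ext_getElem?
  intro c
  rw [mkRow_get?]
  cases c with
  | zero => simp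
  | succ d =>
    simp only [List.getElem?_cons_succ, List.getElem?_replicate]
    by_cases h : d < K
    · rw [if_pos (by omega), if_pos (Or.inr (by simp))]
      simp [h]
    · rw [if_neg (by omega)]
      simp; omega

-- ===== VERDICT (by name: the statement is the Claim_ definition above) =====
theorem solution_spec : Claim_equal_solution := by
  unfold Claim_equal_solution
  intro n k enemy _
  unfold Spec_solution solution solution_alt
  have hmain := dp_main k ((max (min k (enemy.length : Int)) 0).toNat) enemy [] 0 n 0
    (by simp [PWd]) (by simp) (by omega) (by omega) (by omega)
    (fun _ => rfl) (by intro i hi; simp at hi)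
  rw [mkRow_init] at hmain
  simp only [List.map_nil, Nat.cast_zero, sub_zero] at hmain
  by_cases hk : (enemy.length : Int) ≤ k
  · rw [if_pos hk, ← hmain, loopA_total enemy n k [] 0 (by omega)]
    simp
  · rw [if_neg hk, ← hmain]
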